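-- pv_equiv track=rewrite | github.com/wangxianh/exercise | pp_wxh.py | remove_subprime
-- ===== SOURCE A (Python) =====
-- def remove_subprime(tours):  #去除子路径
--     #先对所得到的路径进行排序，从短到长排序
--     tours = sorted(tours, key = lambda tours:(len(tours),tours))
--
--     refined_tours = []
--     l = len(tours)
--
--     for i in range(l):
--         tour = tours[i]
--         redundant = False
--         #去除子路径，判断前面的路径是否出现在后面的路径中
--         for j in range(i+1, l):
--             if tour in tours[j]:
--                 #如果出现将冗余标志置为True
--                 redundant = True
--                 break
--
--         if not redundant:
--             refined_tours.append(tour)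
--
--     return refined_tours
-- ===== SOURCE B (Python) =====
-- def remove_subprime(tours):
--     # dedupe, then keep exactly the strings that have no distinct superstring anywhere
--     candidates = sorted(set(tours), key=lambda t: (len(t), t))
--     return [t for t in candidates
--             if not any(t != u and t in u for u in tours)]
-- ===== Notes on version B (the rewrite author's own statement) =====
-- stated objective: simpler
-- what changed: A scans, for each position in the sorted list, the suffix of strictly later tours to detect containment; B instead dedupes the tours with set(), sorts the distinct strings, and keeps exactly those with no distinct superstring anywhere in the original list (a single global any() per candidate, no positional suffix logic).
import Mathlib
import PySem

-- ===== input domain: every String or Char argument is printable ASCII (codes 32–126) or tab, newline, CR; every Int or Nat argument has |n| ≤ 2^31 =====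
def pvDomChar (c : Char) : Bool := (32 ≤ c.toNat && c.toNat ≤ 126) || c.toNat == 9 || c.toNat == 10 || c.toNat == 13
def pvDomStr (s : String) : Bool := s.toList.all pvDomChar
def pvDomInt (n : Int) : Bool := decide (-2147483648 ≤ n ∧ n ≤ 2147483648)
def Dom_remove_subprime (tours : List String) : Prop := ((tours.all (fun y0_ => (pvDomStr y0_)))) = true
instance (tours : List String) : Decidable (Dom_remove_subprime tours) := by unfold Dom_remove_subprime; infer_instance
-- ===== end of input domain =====

-- B replaces A's positional suffix rescans with a dedup (set) plus a whole-list "no distinct superstring" filter; objective: simpler (not faster).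

-- ===== PORT A =====
-- the for-i loop over the sorted list: tour = head, the inner for-j scan is over the strictly later tours (the tail)
def remove_subprime_go : List String → List String
  | [] => []
  | tour :: rest =>
    if rest.any (fun u => PySem.Str.isIn tour u) then remove_subprime_go rest
    else tour :: remove_subprime_go rest

def remove_subprime (tours : List String) : List String :=
  remove_subprime_go (PySem.List.sorted2 tours (fun t => PySem.Str.len t) (fun t => t))

-- ===== PORT B =====
def remove_subprime_alt (tours : List String) : List String :=
  (PySem.List.sorted2 (PySem.Set.ofList tours) (fun t => PySem.Str.len t) (fun t => t)).filter
    (fun t => !(tours.any (fun u => u != t && PySem.Str.isIn t u)))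

-- ===== PRECONDITION & SPEC =====
def Spec_remove_subprime (tours : List String) (out : List String) : Prop := out = remove_subprime_alt tours
instance (tours : List String) (out : List String) : Decidable (Spec_remove_subprime tours out) := by unfold Spec_remove_subprime; infer_instance

-- ===== CLAIM (what is proved, stated in full; the proofs are below) =====
def Claim_equal_remove_subprime : Prop := ∀ (tours : List String), Dom_remove_subprime tours → Spec_remove_subprime tours (remove_subprime tours)

-- ===== LEMMAS AND PROOFS =====

-- the Python sort key (len(t), t), as one lexicographic key
def pvKey (s : String) : Lex (Int × String) := toLex (PySem.Str.len s, s)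

-- "t survives in B": no distinct superstring of t anywhere in tours
def pvMax (tours : List String) (t : String) : Prop :=
  ∀ u ∈ tours, u = t ∨ ¬ (t.toList <:+: u.toList)

lemma pvKey_injective : Function.Injective pvKey := by
  intro s t h
  have h' := congrArg (fun x => (ofLex x).2) h
  simpa [pvKey] using h'

lemma sorted2_eq_sorted_pvKey (xs : List String) :
    PySem.List.sorted2 xs (fun t => PySem.Str.len t) (fun t => t) =
      PySem.List.sorted xs pvKey := by
  have hf : (fun a b : String =>
      decide (PySem.Str.len a < PySem.Str.len b) ||
        (!decide (PySem.Str.len b < PySem.Str.len a) && decide (a < b)))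
      = fun a b => decide (pvKey a < pvKey b) := by
    funext a b
    rcases lt_trichotomy (a.toList.length) (b.toList.length) with h | h | h <;>
      rw [String.length_toList, String.length_toList] at h
    · simp [pvKey, Prod.Lex.toLex_lt_toLex, h]
    · simp [pvKey, Prod.Lex.toLex_lt_toLex, h]
    · simp [pvKey, Prod.Lex.toLex_lt_toLex, h.ne', Nat.lt_asymm h]
      intro hle
      exact absurd hle (by omega)
  rw [PySem.List.sorted_eq_foldl_insertBy]
  simp only [PySem.List.sorted2, Bool.false_eq_true, if_false, ← hf]

lemma pvKey_lt_of_infix {t u : String} (h : t.toList <:+: u.toList) (hne : t ≠ u) :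
    pvKey t < pvKey u := by
  have hle := h.length_le
  rcases lt_or_eq_of_le hle with hlt | heq
  · simp only [pvKey, Prod.Lex.toLex_lt_toLex, PySem.Str.len_eq]
    exact Or.inl (by exact_mod_cast hlt)
  · exfalso
    have heqL : t.toList = u.toList := h.sublist.eq_of_length heq
    exact hne (String.toList_inj.mp heqL)

lemma go_sublist (xs : List String) : (remove_subprime_go xs).Sublist xs := by
  induction xs with
  | nil => simp [remove_subprime_go]
  | cons t r ih =>
    simp only [remove_subprime_go]
    split
    · exact ih.cons t
    · exact ih.cons₂ t

lemma go_mem (tours : List String) :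
    ∀ (xs : List String), xs.Pairwise (fun a b => pvKey a ≤ pvKey b) →
      (∀ u ∈ xs, u ∈ tours) →
      (∀ u ∈ tours, (∃ w ∈ xs, pvKey w < pvKey u) → u ∈ xs) →
      ∀ t, t ∈ remove_subprime_go xs ↔ (t ∈ xs ∧ pvMax tours t) := by
  intro xs
  induction xs with
  | nil => simp [remove_subprime_go]
  | cons a r ih =>
    intro hpw hsub hcl t
    have hhead := (List.pairwise_cons.mp hpw).1
    have hpw' := (List.pairwise_cons.mp hpw).2
    have hsub' : ∀ u ∈ r, u ∈ tours := fun u hu => hsub u (List.mem_cons_of_mem a hu)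
    have hcl' : ∀ u ∈ tours, (∃ w ∈ r, pvKey w < pvKey u) → u ∈ r := by
      rintro u hu ⟨w, hw, hlt⟩
      have hmem : u ∈ a :: r := hcl u hu ⟨w, List.mem_cons_of_mem a hw, hlt⟩
      rcases List.mem_cons.mp hmem with rfl | h
      · exact absurd (lt_of_le_of_lt (hhead w hw) hlt) (lt_irrefl _)
      · exact h
    have ihr := ih hpw' hsub' hcl'
    simp only [remove_subprime_go]
    by_cases hany : (r.any fun u => PySem.Str.isIn a u) = true
    · rw [if_pos hany, ihr t]
      constructor
      · rintro ⟨htr, hmax⟩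
        exact ⟨List.mem_cons_of_mem a htr, hmax⟩
      · rintro ⟨htar, hmax⟩
        rcases List.mem_cons.mp htar with rfl | h
        · obtain ⟨u, hu, hin⟩ := List.any_eq_true.mp hany
          have hinf : t.toList <:+: u.toList := (PySem.Str.isIn_iff_infix _ _).mp hin
          rcases hmax u (hsub' u hu) with rfl | hni
          · exact ⟨hu, hmax⟩
          · exact absurd hinf hni
        · exact ⟨h, hmax⟩
    · rw [if_neg hany]
      have hnot : ∀ u ∈ r, ¬ (a.toList <:+: u.toList) := by
        intro u hu hinf
        exact hany (List.any_eq_true.mpr ⟨u, hu, (PySem.Str.isIn_iff_infix _ _).mpr hinf⟩)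
      constructor
      · intro hmem
        rcases List.mem_cons.mp hmem with rfl | hmem'
        · refine ⟨List.mem_cons_self .., ?_⟩
          intro u hu
          rcases eq_or_ne u t with rfl | hne
          · exact Or.inl rfl
          · refine Or.inr fun hinf => ?_
            have hlt : pvKey t < pvKey u := pvKey_lt_of_infix hinf (Ne.symm hne)
            have hur : u ∈ t :: r := hcl u hu ⟨t, List.mem_cons_self .., hlt⟩
            rcases List.mem_cons.mp hur with rfl | hur'
            · exact hne rfl
            · exact hnot u hur' hinf
        · have hr := (ihr t).mp hmem'
          exact ⟨List.mem_cons_of_mem a hr.1, hr.2⟩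
      · rintro ⟨htar, hmax⟩
        rcases List.mem_cons.mp htar with rfl | h
        · exact List.mem_cons_self ..
        · exact List.mem_cons_of_mem a ((ihr t).mpr ⟨h, hmax⟩)

lemma go_nodup (xs : List String) : (remove_subprime_go xs).Nodup := by
  induction xs with
  | nil => simp [remove_subprime_go]
  | cons t r ih =>
    simp only [remove_subprime_go]
    split
    · exact ih
    · refine List.nodup_cons.mpr ⟨fun hmem => ?_, ih⟩
      rename_i hany
      have ht : t ∈ r := (go_sublist r).subset hmem
      exact hany (List.any_eq_true.mpr
        ⟨t, ht, (PySem.Str.isIn_iff_infix t t).mpr List.infix_rfl⟩)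

lemma alt_pred_iff (tours : List String) (t : String) :
    (!(tours.any (fun u => u != t && PySem.Str.isIn t u))) = true ↔ pvMax tours t := by
  simp only [Bool.not_eq_eq_eq_not, Bool.not_true, List.any_eq_false, Bool.and_eq_true,
    bne_iff_ne, ne_eq, not_and, pvMax, PySem.Str.isIn_iff_infix]
  exact forall₂_congr fun u hu => (or_iff_not_imp_left).symm

-- ===== VERDICT (by name: the statement is the Claim_ definition above) =====
theorem remove_subprime_spec : Claim_equal_remove_subprime := by
  intro tours _
  unfold Spec_remove_subprime remove_subprime remove_subprime_alt
  rw [sorted2_eq_sorted_pvKey, sorted2_eq_sorted_pvKey]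
  set xs := PySem.List.sorted tours pvKey with hxs
  set ys := PySem.List.sorted (PySem.Set.ofList tours) pvKey with hys
  have hxs_pw : xs.Pairwise (fun a b => pvKey a ≤ pvKey b) :=
    PySem.List.sorted_pairwise tours pvKey
  have hys_pw : ys.Pairwise (fun a b => pvKey a ≤ pvKey b) :=
    PySem.List.sorted_pairwise (PySem.Set.ofList tours) pvKey
  have hmemxs : ∀ u, u ∈ xs ↔ u ∈ tours := fun u => PySem.List.mem_sorted _ _ _ _
  have hmemys : ∀ u, u ∈ ys ↔ u ∈ tours := by
    intro u
    rw [PySem.List.mem_sorted, PySem.Set.mem_ofList]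
  have hgomem : ∀ t, t ∈ remove_subprime_go xs ↔ (t ∈ tours ∧ pvMax tours t) := by
    intro t
    rw [go_mem tours xs hxs_pw (fun u hu => (hmemxs u).mp hu)
      (fun u hu _ => (hmemxs u).mpr hu) t]
    rw [hmemxs]
  have hysnodup : ys.Nodup := by
    have := PySem.Set.nodup_ofList tours
    exact (PySem.List.sorted_perm (PySem.Set.ofList tours) pvKey false).nodup_iff.mpr this
  apply PySem.List.eq_of_perm_of_pairwise_le_of_injective pvKey pvKey_injective
  · rw [List.perm_ext_iff_of_nodup (go_nodup xs) (List.Nodup.filter _ hysnodup)]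
    intro t
    rw [hgomem t, List.mem_filter, hmemys, alt_pred_iff]
  · exact hxs_pw.sublist (go_sublist xs)
  · exact hys_pw.sublist List.filter_sublist
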